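-- pv_equiv track=rewrite | github.com/lpjones/NumaHem | scripts/plot_cluster_no_app.py | infer_clusters
-- ===== SOURCE A (Python) =====
-- def infer_clusters(addresses, gap_threshold_gb):
--     addrs_sorted = sorted(set(addresses))
--     gap_threshold = gap_threshold_gb * 1024 ** 3
--     clusters = []
--
--     cluster_start = addrs_sorted[0]
--     for i in range(1, len(addrs_sorted)):
--         if addrs_sorted[i] - addrs_sorted[i - 1] >= gap_threshold:
--             clusters.append((cluster_start, addrs_sorted[i - 1]))
--             cluster_start = addrs_sorted[i]
--     clusters.append((cluster_start, addrs_sorted[-1]))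
--
--     return clusters
-- ===== SOURCE B (Python) =====
-- def infer_clusters(addresses, gap_threshold_gb):
--     xs = sorted(set(addresses))
--     t = gap_threshold_gb * 1024 ** 3
--     bounds = [0] + [i for i in range(1, len(xs)) if xs[i] - xs[i - 1] >= t] + [len(xs)]
--     return [(xs[s], xs[e - 1]) for s, e in zip(bounds, bounds[1:])]
-- ===== Notes on version B (the rewrite author's own statement) =====
-- stated objective: alternative
-- what changed: B first computes the list of cut indices (boundaries where the gap reaches the threshold) and then materializes each cluster by zipping consecutive boundaries, instead of A's single pass with inline accumulator state.
-- outside the precondition, e.g. on infer_clusters([], 1): A raises IndexError, B raises IndexError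
import Mathlib
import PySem

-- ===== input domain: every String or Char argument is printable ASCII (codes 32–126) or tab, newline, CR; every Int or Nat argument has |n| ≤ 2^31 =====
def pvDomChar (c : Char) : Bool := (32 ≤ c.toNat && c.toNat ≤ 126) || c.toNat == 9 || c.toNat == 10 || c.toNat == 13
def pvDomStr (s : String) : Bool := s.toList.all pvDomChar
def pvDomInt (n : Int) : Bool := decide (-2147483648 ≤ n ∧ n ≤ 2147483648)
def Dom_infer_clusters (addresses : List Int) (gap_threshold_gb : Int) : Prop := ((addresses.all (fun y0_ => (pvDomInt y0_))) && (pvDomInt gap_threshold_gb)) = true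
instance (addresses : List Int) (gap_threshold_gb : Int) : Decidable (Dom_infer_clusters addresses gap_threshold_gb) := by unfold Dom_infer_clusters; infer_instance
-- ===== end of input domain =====

-- B computes the cut indices first and then zips consecutive boundaries, instead of A's
-- single pass with accumulator state; same cost, different decomposition (return value only).

-- ===== PORT A =====
-- Loop indices i and i-1 are always in range (1 ≤ i < len), so pyGetD with default 0 is exact there;
-- the initial xs[0] and final xs[-1] are in range under Pre_ (addresses ≠ []).
def infer_clusters (addresses : List Int) (gap_threshold_gb : Int) : List (Int × Int) :=
  let xs := PySem.List.sorted (PySem.Set.ofList addresses) (fun x => x) false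
  let t := gap_threshold_gb * 1024 ^ 3
  let st := (PySem.List.pyRange 1 (xs.length : Int) 1).foldl
    (fun (st : Int × List (Int × Int)) i =>
      if t ≤ PySem.List.pyGetD xs i 0 - PySem.List.pyGetD xs (i - 1) 0 then
        (PySem.List.pyGetD xs i 0, st.2 ++ [(st.1, PySem.List.pyGetD xs (i - 1) 0)])
      else st)
    (PySem.List.pyGetD xs 0 0, [])
  st.2 ++ [(st.1, PySem.List.pyGetD xs (-1) 0)]

-- ===== PORT B =====
def infer_clusters_alt (addresses : List Int) (gap_threshold_gb : Int) : List (Int × Int) :=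
  let xs := PySem.List.sorted (PySem.Set.ofList addresses) (fun x => x) false
  let t := gap_threshold_gb * 1024 ^ 3
  let bounds : List Int :=
    [0] ++ (PySem.List.pyRange 1 (xs.length : Int) 1).filter
      (fun i => decide (t ≤ PySem.List.pyGetD xs i 0 - PySem.List.pyGetD xs (i - 1) 0))
    ++ [(xs.length : Int)]
  (bounds.zip bounds.tail).map (fun se => (PySem.List.pyGetD xs se.1 0, PySem.List.pyGetD xs (se.2 - 1) 0))

-- ===== PRECONDITION & SPEC =====
-- Pre_ excludes the empty address list, on which A raises IndexError at addrs_sorted[0].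
def Pre_infer_clusters (addresses : List Int) (gap_threshold_gb : Int) : Prop := addresses ≠ []
instance (addresses : List Int) (gap_threshold_gb : Int) : Decidable (Pre_infer_clusters addresses gap_threshold_gb) := by unfold Pre_infer_clusters; infer_instance
def pvWitness_infer_clusters : List Int × Int := ([5, 1, 5, 2000000000], 1)

def Spec_infer_clusters (addresses : List Int) (gap_threshold_gb : Int) (out : List (Int × Int)) : Prop := out = infer_clusters_alt addresses gap_threshold_gb
instance (addresses : List Int) (gap_threshold_gb : Int) (out : List (Int × Int)) : Decidable (Spec_infer_clusters addresses gap_threshold_gb out) := by unfold Spec_infer_clusters; infer_instance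

-- ===== CLAIM (what is proved, stated in full; the proofs are below) =====
def Claim_equal_infer_clusters : Prop := ∀ (addresses : List Int) (gap_threshold_gb : Int), Dom_infer_clusters addresses gap_threshold_gb → Pre_infer_clusters addresses gap_threshold_gb → Spec_infer_clusters addresses gap_threshold_gb (infer_clusters addresses gap_threshold_gb)

-- ===== LEMMAS AND PROOFS =====

-- A conditional fold is the unconditional fold over the filtered list.
theorem foldl_filter_if {α β : Type} (p : β → Bool) (f : α → β → α) (l : List β) (init : α) :
    l.foldl (fun st i => if p i then f st i else st) init = (l.filter p).foldl f init := by
  induction l generalizing init with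
  | nil => rfl
  | cons i l ih =>
    simp only [List.foldl_cons, List.filter_cons]
    by_cases h : p i <;> simp [h, ih]

-- Core correspondence: A's accumulator loop over any cut list c equals B's zip of
-- consecutive boundaries s0 :: c ++ [n], for the index-reading function x.
theorem cuts_core (x : Int → Int) (n : Int) (c : List Int) :
    ∀ (s0 : Int) (acc : List (Int × Int)),
      (let st := c.foldl (fun (st : Int × List (Int × Int)) i => (x i, st.2 ++ [(st.1, x (i - 1))])) (x s0, acc)
       st.2 ++ [(st.1, x (n - 1))])
      = acc ++ (((s0 :: c ++ [n]).zip (c ++ [n])).map (fun se => (x se.1, x (se.2 - 1)))) := by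
  induction c with
  | nil => intro s0 acc; simp
  | cons i c ih =>
    intro s0 acc
    simp only [List.foldl_cons, List.cons_append, List.zip_cons_cons, List.map_cons]
    rw [ih i (acc ++ [(x s0, x (i - 1))])]
    simp

theorem infer_clusters_eq_alt (addresses : List Int) (gap_threshold_gb : Int)
    (h : addresses ≠ []) :
    infer_clusters addresses gap_threshold_gb = infer_clusters_alt addresses gap_threshold_gb := by
  unfold infer_clusters infer_clusters_alt
  obtain ⟨a, as, rfl⟩ := List.exists_cons_of_ne_nil h
  set xs := PySem.List.sorted (PySem.Set.ofList (a :: as)) (fun x => x) false with hxs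
  have hne : xs ≠ [] := by
    intro hnil
    have : a ∈ xs := by
      rw [hxs, PySem.List.mem_sorted, PySem.Set.mem_ofList]; exact List.mem_cons_self
    rw [hnil] at this; exact absurd this (List.not_mem_nil)
  set t := gap_threshold_gb * 1024 ^ 3
  have hcond : (fun (st : Int × List (Int × Int)) i =>
      if t ≤ PySem.List.pyGetD xs i 0 - PySem.List.pyGetD xs (i - 1) 0 then
        (PySem.List.pyGetD xs i 0, st.2 ++ [(st.1, PySem.List.pyGetD xs (i - 1) 0)])
      else st)
      = (fun (st : Int × List (Int × Int)) i =>
          if (fun j => decide (t ≤ PySem.List.pyGetD xs j 0 - PySem.List.pyGetD xs (j - 1) 0)) i then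
            (PySem.List.pyGetD xs i 0, st.2 ++ [(st.1, PySem.List.pyGetD xs (i - 1) 0)])
          else st) := by
    funext st i; simp
  have hlast : PySem.List.pyGetD xs (-1) 0 = PySem.List.pyGetD xs ((xs.length : Int) - 1) 0 := by
    have hlen : 0 < xs.length := List.length_pos_iff.mpr hne
    have he : ((xs.length : Int) - 1) = ((xs.length - 1 : Nat) : Int) := by omega
    rw [PySem.List.pyGetD_neg_ofNat xs 1 0 (by omega) (by omega),
      he, PySem.List.pyGetD_natCast, List.getD_eq_getElem?_getD,
      List.getElem?_eq_getElem (by omega)]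
    rfl
  have key := cuts_core (fun i => PySem.List.pyGetD xs i 0) (xs.length : Int)
    ((PySem.List.pyRange 1 (xs.length : Int) 1).filter
      (fun j => decide (t ≤ PySem.List.pyGetD xs j 0 - PySem.List.pyGetD xs (j - 1) 0))) 0 []
  dsimp only
  rw [hcond, foldl_filter_if, hlast]
  simpa using key

-- ===== VERDICT (by name: the statement is the Claim_ definition above) =====
theorem infer_clusters_spec : Claim_equal_infer_clusters := by
  intro addresses gap_threshold_gb _ hpre
  unfold Spec_infer_clusters
  exact infer_clusters_eq_alt addresses gap_threshold_gb hpre
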